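-- pv_equiv track=rewrite | github.com/pytdbot/client | generate_files.py | getArgTypePython
-- ===== SOURCE A (Python) =====
-- def to_camel_case(input_str: str, delimiter: str = ".", is_class: bool = True) -> str:
--     if not input_str:
--         return ""
--
--     parts = input_str.split(delimiter)
--     camel_case_str = ""
--
--     for i, part in enumerate(parts):
--         if i > 0:
--             camel_case_str += part[0].upper() + part[1:]
--         else:
--             camel_case_str += part
--
--     if camel_case_str:
--         camel_case_str = (
--             camel_case_str[0].upper() if is_class else camel_case_str[0].lower()
--         ) + camel_case_str[1:]
--
--     return camel_case_str
--
-- arg_types = {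
--     "double": "float",
--     "string": "str",
--     "secureString": "str",
--     "int32": "int",
--     "int53": "int",
--     "int64": "int",
--     "int256": "int",
--     "bytes": "bytes",
--     "secureBytes": "bytes",
--     "Bool": "bool",
--     "Object": "dict",
--     "Function": "dict",
--     "#": "int",
-- }
--
-- def getArgTypePython(
--     type_name: str, is_function: bool = False, is_docstring: bool = False
-- ):
--     if type_name in arg_types:
--         if is_docstring:
--             return f":class:`{arg_types[type_name]}`"
--
--         return arg_types[type_name]
--
--     if "?" in type_name:
--         return getArgTypePython(type_name.split("?")[-1], is_function, is_docstring)
--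
--     if type_name.startswith("("):
--         type_name = type_name.strip("()")
--         kind, inner = type_name.split(" ", 1)
--         if kind == "vector":
--             return f"List[{getArgTypePython(inner, is_function, is_docstring)}]"
--         raise ValueError(f"Unknown data type: {kind}/{inner}")
--
--     if type_name.startswith("vector<") and type_name.endswith(">"):
--         inner = type_name[7:-1]
--         return f"List[{getArgTypePython(inner, is_function, is_docstring)}]"
--
--     class_name = to_camel_case(type_name, is_class=True)
--
--     if is_function:
--         if is_docstring:
--             return f":class:`~pytdbot.types.{class_name}`"
--         return f'"pytdbot.types.{class_name}"'
--
--     return class_name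
-- ===== SOURCE B (Python) =====
-- arg_types = {
--     "double": "float",
--     "string": "str",
--     "secureString": "str",
--     "int32": "int",
--     "int53": "int",
--     "int64": "int",
--     "int256": "int",
--     "bytes": "bytes",
--     "secureBytes": "bytes",
--     "Bool": "bool",
--     "Object": "dict",
--     "Function": "dict",
--     "#": "int",
-- }
--
--
-- def getArgTypePython(
--     type_name: str, is_function: bool = False, is_docstring: bool = False
-- ):
--     # Phase 1: iteratively peel '?'-annotations and list wrappers, only
--     # counting the nesting depth; no formatting happens in this loop.
--     depth = 0
--     t = type_name
--     while True:
--         if "?" in t: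
--             t = t.split("?")[-1]
--         elif t.startswith("("):
--             kind, inner = t.strip("()").split(" ", 1)
--             if kind != "vector":
--                 raise ValueError(f"Unknown data type: {kind}/{inner}")
--             depth += 1
--             t = inner
--         elif t.startswith("vector<") and t.endswith(">"):
--             depth += 1
--             t = t[7:-1]
--         else:
--             break
--     # Phase 2: format the innermost type once.
--     if t in arg_types:
--         base = arg_types[t]
--         if is_docstring:
--             base = f":class:`{base}`"
--     else:
--         cls = "".join(p[:1].upper() + p[1:] for p in t.split("."))
--         if is_function:
--             base = (
--                 f":class:`~pytdbot.types.{cls}`"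
--                 if is_docstring
--                 else f'"pytdbot.types.{cls}"'
--             )
--         else:
--             base = cls
--     # Phase 3: wrap with the collected depth by string repetition.
--     return "List[" * depth + base + "]" * depth
-- ===== Notes on version B (the rewrite author's own statement) =====
-- stated objective: alternative
-- what changed: A's formatting-inside-recursion is split into three phases: an iterative peeling loop that only counts list-nesting depth, a single base-formatting step with the dict lookup done once at the end, and wrapping by string repetition; to_camel_case's indexed accumulator loop becomes a join of per-part first-character-uppercased pieces.
import Mathlib
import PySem

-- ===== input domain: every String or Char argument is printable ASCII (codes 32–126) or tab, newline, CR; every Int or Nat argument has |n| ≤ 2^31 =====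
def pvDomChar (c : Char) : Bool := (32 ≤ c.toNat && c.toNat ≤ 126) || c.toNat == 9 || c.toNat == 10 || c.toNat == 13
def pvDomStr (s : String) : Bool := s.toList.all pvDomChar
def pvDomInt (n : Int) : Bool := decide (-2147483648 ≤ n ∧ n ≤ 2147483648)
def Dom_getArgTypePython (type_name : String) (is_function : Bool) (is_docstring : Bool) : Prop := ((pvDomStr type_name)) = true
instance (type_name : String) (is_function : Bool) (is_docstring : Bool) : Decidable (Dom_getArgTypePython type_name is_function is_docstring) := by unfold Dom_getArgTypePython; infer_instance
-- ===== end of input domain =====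

-- B restructures A's formatting recursion into three phases: one peeling loop that only counts
-- list-nesting depth, a single base-formatting step, and wrapping by string repetition; the
-- camel-case accumulator loop becomes a join of per-part uppercased pieces. Alternative
-- decomposition, no speed claim.


-- ===== PORT A =====
-- module-level dict arg_types (shared by both Pythons)
def pvArgTypes : PySem.Dict (List Char) (List Char) := PySem.Dict.mk
  [("double".toList, "float".toList), ("string".toList, "str".toList),
   ("secureString".toList, "str".toList), ("int32".toList, "int".toList),
   ("int53".toList, "int".toList), ("int64".toList, "int".toList),
   ("int256".toList, "int".toList), ("bytes".toList, "bytes".toList),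
   ("secureBytes".toList, "bytes".toList), ("Bool".toList, "bool".toList),
   ("Object".toList, "dict".toList), ("Function".toList, "dict".toList),
   ("#".toList, "int".toList)]

-- A's to_camel_case, transliterated (indexed loop over enumerate(parts)).
-- part[0] on an empty part is an IndexError in Python (outside Pre_); the port appends [].
def pvToCamelCaseA (input : List Char) (delimiter : List Char) (isClass : Bool) : List Char :=
  if input = [] then []
  else
    let parts := PySem.Chars.splitOn input delimiter
    let camel := (PySem.List.enumerate parts).foldl (fun acc ip =>
      acc ++ (if ip.1 > 0 then
        (match PySem.List.pyGet? ip.2 0 with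
         | none => []
         | some c => PySem.Chars.upperChar c :: PySem.List.slice ip.2 (some 1) none)
      else ip.2)) []
    if camel ≠ [] then
      (match camel with
       | [] => camel
       | c :: cs => (if isClass then PySem.Chars.upperChar c else PySem.Chars.lowerChar c) :: cs)
    else camel

-- A's recursion, with a fuel bound (each call strictly shortens the string, so
-- length+1 fuel is never exhausted); [] marks the two Python raise sites (outside Pre_).
def pvGetA : Nat → List Char → Bool → Bool → List Char
  | 0, _, _, _ => []
  | fuel + 1, tn, is_function, is_docstring =>
    match PySem.Dict.get? pvArgTypes tn with
    | some v => if is_docstring then ":class:`".toList ++ v ++ "`".toList else v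
    | none =>
      if PySem.Chars.isIn "?".toList tn then
        pvGetA fuel ((PySem.List.pyGet? (PySem.Chars.splitOn tn "?".toList) (-1)).getD []) is_function is_docstring
      else if PySem.Chars.startswith tn "(".toList then
        let stripped := PySem.Chars.stripChars tn "()".toList
        match PySem.Chars.splitOnMax stripped " ".toList 1 with
        | [kind, inner] =>
          if kind = "vector".toList then
            "List[".toList ++ pvGetA fuel inner is_function is_docstring ++ "]".toList
          else []                     -- Python: raise ValueError (unknown kind)
        | _ => []                     -- Python: ValueError (unpacking, no space)
      else if PySem.Chars.startswith tn "vector<".toList && PySem.Chars.endswith tn ">".toList then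
        "List[".toList ++ pvGetA fuel (PySem.Chars.slice tn (some 7) (some (-1))) is_function is_docstring ++ "]".toList
      else
        let className := pvToCamelCaseA tn ".".toList true
        if is_function then
          if is_docstring then ":class:`~pytdbot.types.".toList ++ className ++ "`".toList
          else "\"pytdbot.types.".toList ++ className ++ "\"".toList
        else className

def getArgTypePython (type_name : String) (is_function : Bool) (is_docstring : Bool) : String :=
  String.ofList (pvGetA (type_name.toList.length + 1) type_name.toList is_function is_docstring)

-- ===== PORT B =====
-- B's t.split("?")[-1]
def pvTailB (x : List Char) : List Char :=
  (PySem.List.pyGet? (PySem.Chars.splitOn x "?".toList) (-1)).getD []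

-- Phase 1 of B: the peeling loop; returns (list_depth, some core), or (…, none) at the two
-- Python raise sites (outside Pre_). Same fuel bound as A's port; fuel 0 is unreachable.
def pvUnwrapB : Nat → List Char → Nat × Option (List Char)
  | 0, _ => (0, none)
  | fuel + 1, t =>
    if PySem.Chars.isIn "?".toList t then
      pvUnwrapB fuel (pvTailB t)
    else if PySem.Chars.startswith t "(".toList then
      match PySem.Chars.splitOnMax (PySem.Chars.stripChars t "()".toList) " ".toList 1 with
      | [kind, inner] =>
        if kind = "vector".toList then
          let r := pvUnwrapB fuel inner
          (r.1 + 1, r.2)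
        else (0, none)               -- Python: raise ValueError (unknown kind)
      | _ => (0, none)               -- Python: ValueError (unpacking, no space)
    else if PySem.Chars.startswith t "vector<".toList && PySem.Chars.endswith t ">".toList then
      let r := pvUnwrapB fuel (PySem.Chars.slice t (some 7) (some (-1)))
      (r.1 + 1, r.2)
    else (0, some t)

-- B's inline camel case: "".join(p[:1].upper() + p[1:] for p in s.split("."))
def pvCamelClassB (s : List Char) : List Char :=
  PySem.Chars.join []
    ((PySem.Chars.splitOn s ".".toList).map (fun p =>
      PySem.Chars.upper (PySem.List.slice p none (some 1)) ++ PySem.List.slice p (some 1) none))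

-- Phase 2 of B: format the core once.
def pvBaseB (t : List Char) (is_function is_docstring : Bool) : List Char :=
  match PySem.Dict.get? pvArgTypes t with
  | some v => if is_docstring then ":class:`".toList ++ v ++ "`".toList else v
  | none =>
    let cls := pvCamelClassB t
    if is_function then
      if is_docstring then ":class:`~pytdbot.types.".toList ++ cls ++ "`".toList
      else "\"pytdbot.types.".toList ++ cls ++ "\"".toList
    else cls

-- raise marker: none (a Python raise, outside Pre_) formats to []
def pvBaseO (o : Option (List Char)) (is_function is_docstring : Bool) : List Char :=
  match o with
  | none => []
  | some t => pvBaseB t is_function is_docstring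

-- Phase 3 of B: "List[" * depth + base + "]" * depth
def pvWrapB (d : Nat) (b : List Char) : List Char :=
  (List.replicate d "List[".toList).flatten ++ b ++ List.replicate d ']'

def getArgTypePython_alt (type_name : String) (is_function : Bool) (is_docstring : Bool) : String :=
  let r := pvUnwrapB (type_name.toList.length + 1) type_name.toList
  String.ofList (pvWrapB r.1 (pvBaseO r.2 is_function is_docstring))

-- ===== PRECONDITION & SPEC =====
-- Grammar of the type expressions A parses without raising, in plain list operations
-- (independent of both ports). The Nat is a recursion bound: every nested wrapper costs at
-- least two characters, so length+1 is never exhausted.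
def pvKeys : List (List Char) :=
  ["double".toList, "string".toList, "secureString".toList, "int32".toList, "int53".toList,
   "int64".toList, "int256".toList, "bytes".toList, "secureBytes".toList, "Bool".toList,
   "Object".toList, "Function".toList, "#".toList]

-- the segment after the last '?' (the whole string if none)
def pvQTail (u : List Char) : List Char := (u.reverse.takeWhile (· ≠ '?')).reverse

def pvIsParen (c : Char) : Bool := c = '(' || c = ')'

-- u.strip("()")
def pvStripParens (u : List Char) : List Char :=
  ((u.dropWhile pvIsParen).reverse.dropWhile pvIsParen).reverse

def pvAccN : Nat → List Char → Bool
  | 0, _ => false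
  | n + 1, u =>
    if u ∈ pvKeys then true
    else if u.head? = some '(' then
      let s := pvStripParens u
      let kind := s.takeWhile (· ≠ ' ')
      if kind.length < s.length then                 -- a space occurs in s
        kind = "vector".toList && pvAccN n (pvQTail (s.drop (kind.length + 1)))
      else false                                     -- no space: ValueError on unpacking
    else if "vector<".toList.isPrefixOf u && u.getLast? = some '>' then
      pvAccN n (pvQTail (u.dropLast.drop 7))
    else
      -- plain name: camel-casing raises IndexError iff a dotted component after the
      -- first is empty, i.e. ".." occurs or the name ends with "."
      !((u.zip u.tail).any (fun p => p.1 = '.' && p.2 = '.')) && !(u.getLast? = some '.')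

-- Pre_ holds exactly on the inputs where the Python A returns normally; outside it A raises
-- (ValueError on a malformed/unknown parenthesized form, IndexError on an empty dotted
-- component) and nothing is claimed.
def Pre_getArgTypePython (type_name : String) (is_function : Bool) (is_docstring : Bool) : Prop :=
  pvAccN (type_name.toList.length + 1) (pvQTail type_name.toList) = true
instance (type_name : String) (is_function : Bool) (is_docstring : Bool) : Decidable (Pre_getArgTypePython type_name is_function is_docstring) := by unfold Pre_getArgTypePython; infer_instance

def pvWitness_getArgTypePython : String × Bool × Bool := ("(vector vector<int32?bytes>)", false, true)

def Spec_getArgTypePython (type_name : String) (is_function : Bool) (is_docstring : Bool) (out : String) : Prop := out = getArgTypePython_alt type_name is_function is_docstring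
instance (type_name : String) (is_function : Bool) (is_docstring : Bool) (out : String) : Decidable (Spec_getArgTypePython type_name is_function is_docstring out) := by unfold Spec_getArgTypePython; infer_instance

-- ===== CLAIM =====
def Claim_equal_getArgTypePython : Prop := ∀ (type_name : String) (is_function : Bool) (is_docstring : Bool), Dom_getArgTypePython type_name is_function is_docstring → Pre_getArgTypePython type_name is_function is_docstring → Spec_getArgTypePython type_name is_function is_docstring (getArgTypePython type_name is_function is_docstring)

-- ===== LEMMAS AND PROOFS =====

-- step for one camel-case part: []-part contributes [] (A's raise site), else uppercase head
def pvStep (p : List Char) : List Char :=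
  match PySem.List.pyGet? p 0 with
  | none => []
  | some c => PySem.Chars.upperChar c :: PySem.List.slice p (some 1) none

theorem pvUpperChar_idem (c : Char) :
    PySem.Chars.upperChar (PySem.Chars.upperChar c) = PySem.Chars.upperChar c := by
  unfold PySem.Chars.upperChar PySem.Chars.islower
  by_cases h1 : 'a' ≤ c
  · by_cases h2 : c ≤ 'z'
    · have hlo : 97 ≤ c.toNat := h1
      have hhi : c.toNat ≤ 122 := h2
      have hval : (c.toNat - 32).isValidChar := by
        unfold Nat.isValidChar
        omega
      have hnl : ¬ ('a' ≤ Char.ofNat (c.toNat - 32)) := by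
        intro hle
        have h97 : 97 ≤ (Char.ofNat (c.toNat - 32)).toNat := hle
        rw [Char.toNat_ofNat, if_pos hval] at h97
        omega
      simp [h1, h2, hnl]
    · simp [h2]
  · simp [h1]

theorem pvStep_cons (c : Char) (cs : List Char) :
    pvStep (c :: cs) = PySem.Chars.upperChar c :: cs := by
  have h1 : PySem.List.slice (c :: cs) (some 1) none = cs := by
    rw [PySem.List.slice_from _ (by norm_num)]
    rfl
  simp [pvStep, h1]

theorem pvStepB_eq (p : List Char) :
    PySem.Chars.upper (PySem.List.slice p none (some 1)) ++ PySem.List.slice p (some 1) none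
      = pvStep p := by
  cases p with
  | nil => rfl
  | cons c cs =>
    rw [pvStep_cons]
    have ht : PySem.List.slice (c :: cs) none (some 1) = [c] := by
      rw [PySem.List.slice_to _ (by norm_num)]
      rfl
    have h1 : PySem.List.slice (c :: cs) (some 1) none = cs := by
      rw [PySem.List.slice_from _ (by norm_num)]
      rfl
    rw [ht, h1]
    rfl

theorem pvFoldA (ps : List (List Char)) (k : Int) (acc : List Char) (hk : 1 ≤ k) :
    (PySem.List.enumerate ps k).foldl (fun acc ip =>
      acc ++ (if ip.1 > 0 then
        (match PySem.List.pyGet? ip.2 0 with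
         | none => []
         | some c => PySem.Chars.upperChar c :: PySem.List.slice ip.2 (some 1) none)
      else ip.2)) acc = acc ++ (ps.map pvStep).flatten := by
  induction ps generalizing k acc with
  | nil => simp [PySem.List.enumerate]
  | cons p rest ih =>
    rw [show PySem.List.enumerate (p :: rest) k = (k, p) :: PySem.List.enumerate rest (k + 1) from rfl]
    rw [List.foldl_cons]
    rw [if_pos (show ((k, p) : Int × List Char).1 > 0 by simpa using by omega)]
    rw [ih (k + 1) _ (by omega)]
    show acc ++ pvStep p ++ _ = _
    simp

theorem pvHeadFixed (ps : List (List Char)) (c : Char) (cs : List Char)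
    (h : (ps.map pvStep).flatten = c :: cs) : PySem.Chars.upperChar c = c := by
  induction ps generalizing c cs with
  | nil => simp at h
  | cons p rest ih =>
    cases p with
    | nil =>
      simp [pvStep] at h
      exact ih _ _ h
    | cons a as =>
      rw [List.map_cons, pvStep_cons, List.flatten_cons, List.cons_append] at h
      obtain ⟨rfl, -⟩ := List.cons.inj h
      exact pvUpperChar_idem a

theorem pvJoinFlatten (ps : List (List Char)) : PySem.Chars.join [] ps = ps.flatten := by
  induction ps with
  | nil => simp [PySem.Chars.join_nil]
  | cons p rest ih =>
    cases rest with
    | nil => simp [PySem.Chars.join_singleton]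
    | cons q rest' =>
      rw [PySem.Chars.join_cons_cons, ih]
      simp

theorem pvCamelEq (tn : List Char) : pvToCamelCaseA tn ['.'] true = pvCamelClassB tn := by
  by_cases h : tn = []
  · subst h
    decide
  · have hmap : (fun p => PySem.Chars.upper (PySem.List.slice p none (some 1)) ++ PySem.List.slice p (some 1) none) = pvStep := funext pvStepB_eq
    simp only [pvToCamelCaseA, pvCamelClassB, if_neg h, hmap, pvJoinFlatten, show ((".".toList : List Char)) = ['.'] from rfl]
    cases hps : PySem.Chars.splitOn tn ['.'] with
    | nil => simp [PySem.List.enumerate]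
    | cons p0 rest =>
      rw [show PySem.List.enumerate (p0 :: rest) 0 = ((0 : Int), p0) :: PySem.List.enumerate rest 1 from rfl]
      rw [List.foldl_cons, pvFoldA rest 1 _ (by omega)]
      have h0 : ¬ ((((0 : Int), p0)).1 > 0) := by norm_num
      rw [if_neg h0, List.nil_append, List.map_cons, List.flatten_cons]
      cases p0 with
      | cons a as =>
        rw [pvStep_cons]
        rw [if_pos (show (a :: as) ++ (List.map pvStep rest).flatten ≠ [] by simp)]
        rfl
      | nil =>
        rw [show pvStep [] = [] from rfl, List.nil_append]
        cases hC : (rest.map pvStep).flatten with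
        | nil => simp
        | cons c cs =>
          have hfix := pvHeadFixed rest c cs hC
          rw [if_pos (by simp)]
          simp [hfix]

-- dict keys match none of the loop's peeling branches
theorem pvKeyShape (t v : List Char) (hv : PySem.Dict.get? pvArgTypes t = some v) :
    PySem.Chars.isIn "?".toList t = false ∧
    PySem.Chars.startswith t "(".toList = false ∧
    (PySem.Chars.startswith t "vector<".toList && PySem.Chars.endswith t ">".toList) = false := by
  rw [show PySem.Dict.get? pvArgTypes t
        = Option.map (fun x => x.2) (List.find? (fun p => p.1 == t) pvArgTypes.items) from rfl] at hv
  rw [Option.map_eq_some_iff] at hv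
  obtain ⟨pr, hfind, -⟩ := hv
  have hp := List.find?_some hfind
  have hmem := List.mem_of_find?_eq_some hfind
  rw [show pvArgTypes.items
        = [("double".toList, "float".toList), ("string".toList, "str".toList),
           ("secureString".toList, "str".toList), ("int32".toList, "int".toList),
           ("int53".toList, "int".toList), ("int64".toList, "int".toList),
           ("int256".toList, "int".toList), ("bytes".toList, "bytes".toList),
           ("secureBytes".toList, "bytes".toList), ("Bool".toList, "bool".toList),
           ("Object".toList, "dict".toList), ("Function".toList, "dict".toList),
           ("#".toList, "int".toList)] from rfl] at hmem
  simp only [List.mem_cons, List.not_mem_nil, or_false] at hmem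
  rcases hmem with rfl|rfl|rfl|rfl|rfl|rfl|rfl|rfl|rfl|rfl|rfl|rfl|rfl <;>
    rw [← eq_of_beq hp] <;> decide

theorem pvWrapB_succ (d : Nat) (b : List Char) :
    pvWrapB (d + 1) b = "List[".toList ++ pvWrapB d b ++ "]".toList := by
  unfold pvWrapB
  rw [List.replicate_succ, List.flatten_cons, List.replicate_succ' (n := d) (a := ']')]
  simp

theorem pvMain (fuel : Nat) : ∀ (t : List Char) (f d : Bool),
    pvGetA fuel t f d
      = pvWrapB (pvUnwrapB fuel t).1 (pvBaseO (pvUnwrapB fuel t).2 f d) := by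
  induction fuel with
  | zero => intro t f d; rfl
  | succ fuel ih =>
    intro t f d
    simp only [pvGetA, pvUnwrapB]
    cases hv : PySem.Dict.get? pvArgTypes t with
    | some v =>
      obtain ⟨hq, hp, hvv⟩ := pvKeyShape t v hv
      simp only [hq, hp, hvv, Bool.false_eq_true, if_false]
      simp [pvWrapB, pvBaseO, pvBaseB, hv]
    | none =>
      by_cases hq : PySem.Chars.isIn "?".toList t = true
      · simp only [hq, if_true]
        rw [show pvTailB t = (PySem.List.pyGet? (PySem.Chars.splitOn t "?".toList) (-1)).getD [] from rfl]
        exact ih _ f d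
      · simp only [hq]
        by_cases hp : PySem.Chars.startswith t "(".toList = true
        · simp only [hp, if_true, Bool.false_eq_true, if_false]
          cases hsp : PySem.Chars.splitOnMax (PySem.Chars.stripChars t "()".toList) " ".toList 1 with
          | nil => rfl
          | cons kind rest =>
            cases rest with
            | nil => rfl
            | cons inner rest' =>
              cases rest' with
              | cons x xs => rfl
              | nil =>
                by_cases hk : kind = "vector".toList
                · simp only [hk, if_true]
                  rw [ih inner f d, pvWrapB_succ]
                · simp only [hk, if_false]
                  rfl
        · simp only [hp]
          by_cases hvv : (PySem.Chars.startswith t "vector<".toList && PySem.Chars.endswith t ">".toList) = true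
          · simp only [hvv, if_true, Bool.false_eq_true, if_false]
            rw [ih _ f d, pvWrapB_succ]
          · simp only [hvv, Bool.false_eq_true, if_false]
            simp [pvWrapB, pvBaseO, pvBaseB, hv, pvCamelEq]

-- ===== VERDICT =====
theorem getArgTypePython_spec : Claim_equal_getArgTypePython := by
  intro tn f d _ _
  unfold Spec_getArgTypePython getArgTypePython getArgTypePython_alt
  exact congrArg String.ofList (pvMain (tn.toList.length + 1) tn.toList f d)
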